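-- pv_equiv track=rewrite | github.com/sirajhahmadnazeer123/Geeksforgeeks | Easy/Love For The Twins/love-for-the-twins.py | getTwinCount
-- ===== SOURCE A (Python) =====
-- def getTwinCount(N , Arr):
--     # code here
--     d={}
--     for i in Arr:
--         if i in d:
--             d[i]+=1
--         else:
--             d[i]=1
--     c=0
--     for i in d:
--         if d[i]>1:
--             c+=d[i]//2
--
--     return c+c
-- ===== SOURCE B (Python) =====
-- def getTwinCount(N, Arr):
--     s = sorted(Arr)
--     total = 0
--     i = 0
--     n = len(s)
--     while i < n:
--         j = i
--         while j < n and s[j] == s[i]: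
--             j += 1
--         total += (j - i) // 2
--         i = j
--     return 2 * total
-- ===== Notes on version B (the rewrite author's own statement) =====
-- stated objective: alternative
-- what changed: Replaces the dict frequency count plus a second pass over the keys by sorting a copy and scanning consecutive equal runs, adding run_length//2 per run.
import Mathlib
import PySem

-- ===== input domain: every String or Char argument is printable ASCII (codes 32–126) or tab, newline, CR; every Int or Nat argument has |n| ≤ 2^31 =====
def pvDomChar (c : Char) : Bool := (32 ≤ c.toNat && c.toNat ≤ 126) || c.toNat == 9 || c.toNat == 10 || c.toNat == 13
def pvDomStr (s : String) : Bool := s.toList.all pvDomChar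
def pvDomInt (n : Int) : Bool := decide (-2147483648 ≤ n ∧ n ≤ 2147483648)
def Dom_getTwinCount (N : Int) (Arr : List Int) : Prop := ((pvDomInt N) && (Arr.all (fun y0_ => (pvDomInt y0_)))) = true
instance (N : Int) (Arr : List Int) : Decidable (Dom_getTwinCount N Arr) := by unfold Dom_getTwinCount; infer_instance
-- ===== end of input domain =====

-- B replaces A's dict frequency count by sorting a copy and scanning consecutive equal runs; equal return values on all inputs.

-- ===== PORT A =====
def getTwinCount (N : Int) (Arr : List Int) : Int :=
  let d := Arr.foldl (fun d i =>
    if d.contains i then d.insert i (d.getD i 0 + 1) else d.insert i 1)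
    (PySem.Dict.empty : PySem.Dict Int Int)
  let c := d.keys.foldl (fun c i =>
    if d.getD i 0 > 1 then c + PySem.Int.floordiv (d.getD i 0) 2 else c) 0
  c + c

-- ===== PORT B =====
-- inner while loop of Source B: the run of elements equal to the head contributes run_length // 2
def runScan (l : List Int) : Int :=
  match l with
  | [] => 0
  | x :: xs =>
    PySem.Int.floordiv (1 + (xs.takeWhile (· == x)).length : Int) 2
      + runScan (xs.dropWhile (· == x))
termination_by l.length
decreasing_by
  simp only [List.length_cons]
  exact Nat.lt_succ_of_le (List.length_dropWhile_le _ _)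

def getTwinCount_alt (N : Int) (Arr : List Int) : Int :=
  2 * runScan (PySem.List.sorted Arr (fun x => x) false)

-- ===== PRECONDITION & SPEC =====
def Spec_getTwinCount (N : Int) (Arr : List Int) (out : Int) : Prop := out = getTwinCount_alt N Arr
instance (N : Int) (Arr : List Int) (out : Int) : Decidable (Spec_getTwinCount N Arr out) := by unfold Spec_getTwinCount; infer_instance

-- ===== CLAIM (what is proved, stated in full; the proofs are below) =====
def Claim_equal_getTwinCount : Prop := ∀ (N : Int) (Arr : List Int), Dom_getTwinCount N Arr → Spec_getTwinCount N Arr (getTwinCount N Arr)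

-- ===== LEMMAS AND PROOFS =====

-- the common value both sides compute: Σ over distinct elements of count // 2
def twinSum (l : List Int) : Int :=
  ∑ k ∈ l.toFinset, PySem.Int.floordiv (l.count k : Int) 2

theorem a_eq_twinSum (N : Int) (Arr : List Int) :
    getTwinCount N Arr = twinSum Arr + twinSum Arr := by
  unfold getTwinCount
  have hd : Arr.foldl (fun d i => if d.contains i then d.insert i (d.getD i 0 + 1) else d.insert i 1)
      (PySem.Dict.empty : PySem.Dict Int Int) = PySem.Dict.counter Arr := by
    rw [← PySem.Dict.foldl_insert_getD_add_one_eq_counter]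
    congr 1
    funext d i
    by_cases h : d.contains i = true
    · simp [h]
    · have h0 : d.getD i 0 = 0 := by
        have := (PySem.Dict.get?_eq_none_iff_contains d i).2 (by simpa using h)
        simp [PySem.Dict.getD, this]
      simp [h, h0]
  simp only [hd, PySem.Dict.getD_counter, PySem.Dict.keys_counter]
  have hstep : ∀ (c i : Int),
      (if ((Arr.count i : Int) > 1) then c + PySem.Int.floordiv (Arr.count i : Int) 2 else c)
      = c + (if ((Arr.count i : Int) > 1) then PySem.Int.floordiv (Arr.count i : Int) 2 else 0) := by
    intro c i; split <;> simp
  rw [show (fun (c i : Int) => if ((Arr.count i:Int) > 1) then c + PySem.Int.floordiv (Arr.count i:Int) 2 else c)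
      = (fun c i => c + (if ((Arr.count i:Int) > 1) then PySem.Int.floordiv (Arr.count i:Int) 2 else 0)) from funext₂ hstep]
  rw [PySem.List.foldl_add]
  have hmap : (PySem.Set.ofList Arr).map (fun i => if ((Arr.count i:Int) > 1) then PySem.Int.floordiv (Arr.count i:Int) 2 else 0)
      = (PySem.Set.ofList Arr).map (fun i => PySem.Int.floordiv (Arr.count i:Int) 2) := by
    apply List.map_congr_left
    intro i hi
    have h1 : 1 ≤ Arr.count i := List.count_pos_iff.2 (by
      simpa using (PySem.Set.mem_ofList (xs := Arr) (y := i)).1 hi)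
    by_cases h : (Arr.count i : Int) > 1
    · simp [h]
    · have : Arr.count i = 1 := by omega
      simp [this]
  rw [hmap]
  have hsum : ((PySem.Set.ofList Arr).map (fun i => PySem.Int.floordiv (Arr.count i:Int) 2)).sum = twinSum Arr := by
    rw [twinSum, ← List.sum_toFinset _ (PySem.Set.nodup_ofList Arr)]
    apply Finset.sum_congr
    · ext x; simp [PySem.Set.mem_ofList]
    · intros; rfl
  rw [hsum]; ring

theorem runScan_eq (l : List Int) (h : l.Pairwise (· ≤ ·)) : runScan l = twinSum l := by
  induction l using runScan.induct with
  | case1 => simp [runScan, twinSum]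
  | case2 x xs ih =>
    set t := xs.takeWhile (· == x) with ht
    set r := xs.dropWhile (· == x) with hr
    have hxs : t ++ r = xs := List.takeWhile_append_dropWhile
    have htall : ∀ y ∈ t, y = x := by
      intro y hy
      have := List.mem_takeWhile_imp (ht ▸ hy)
      simpa using this
    have hpr : r.Pairwise (· ≤ ·) := (List.pairwise_cons.1 h).2.sublist (List.dropWhile_sublist _)
    have hxle : ∀ y ∈ xs, x ≤ y := (List.pairwise_cons.1 h).1
    have hxnr : x ∉ r := by
      cases hr' : r with
      | nil => simp
      | cons y0 rr =>
        have hny0 : ¬ (y0 == x) = true := by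
          have hne : xs.dropWhile (· == x) ≠ [] := by rw [← hr, hr']; simp
          have h2 := List.head_dropWhile_not (· == x) hne
          simp only [← hr, hr'] at h2
          simpa using h2
        have hy0x : x < y0 := by
          have : y0 ∈ xs := by
            rw [← hxs, hr']; exact List.mem_append_right _ (by simp)
          have hle := hxle y0 this
          have : y0 ≠ x := by simpa using hny0
          omega
        intro hmem
        rcases List.mem_cons.1 hmem with h1 | h1
        · omega
        · have : y0 ≤ x := by
            have hpr2 := hpr
            rw [hr'] at hpr2
            exact (List.pairwise_cons.1 hpr2).1 x h1
          omega
    have hcx : (x :: xs).count x = 1 + t.length := by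
      rw [← hxs, List.count_cons_self, List.count_append]
      have h1 : t.count x = t.length := List.count_eq_length.2 (fun y hy => by simp [htall y hy])
      have h2 : r.count x = 0 := List.count_eq_zero.2 hxnr
      omega
    have hck : ∀ k, k ≠ x → (x :: xs).count k = r.count k := by
      intro k hk
      rw [← hxs, List.count_cons_of_ne (by omega), List.count_append]
      have : t.count k = 0 := List.count_eq_zero.2 (fun hm => hk (htall k hm))
      omega
    have hfin : (x :: xs).toFinset = insert x r.toFinset := by
      ext z
      simp only [List.toFinset_cons, ← hxs, List.toFinset_append, Finset.mem_insert,
        Finset.mem_union, List.mem_toFinset]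
      constructor
      · rintro (rfl | hz | hz)
        · left; rfl
        · left; exact htall z hz
        · right; exact hz
      · rintro (rfl | hz)
        · left; rfl
        · right; right; exact hz
    rw [runScan, ← ht, ← hr, ih hpr, twinSum, twinSum, hfin,
      Finset.sum_insert (by simpa using hxnr)]
    congr 1
    · rw [hcx]; push_cast; ring_nf
    · apply Finset.sum_congr rfl
      intro k hk
      rw [hck k (by intro hkx; exact hxnr (hkx ▸ (List.mem_toFinset.1 hk)))]

theorem b_eq_twinSum (N : Int) (Arr : List Int) :
    getTwinCount_alt N Arr = 2 * twinSum Arr := by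
  unfold getTwinCount_alt
  rw [runScan_eq _ (by simpa using PySem.List.sorted_pairwise Arr (fun x => x))]
  congr 1
  unfold twinSum
  have hperm := PySem.List.sorted_perm (xs := Arr) (key := fun x => x) (rev := false)
  apply Finset.sum_congr
  · ext z; simp [PySem.List.mem_sorted]
  · intro k _
    rw [hperm.count_eq]

-- ===== VERDICT (by name: the statement is the Claim_ definition above) =====
theorem getTwinCount_spec : Claim_equal_getTwinCount := by
  intro N Arr _
  show getTwinCount N Arr = getTwinCount_alt N Arr
  rw [a_eq_twinSum, b_eq_twinSum, two_mul]
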